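-- pv_equiv track=rewrite | github.com/amochtar/adventofcode | 2018/day-08/part2.py | parse
-- ===== SOURCE A (Python) =====
-- def parse(tree):
--     num_childs = tree[0]
--     num_metadata = tree[1]
--     tree = tree[2:]
--
--     total = 0
--     values = []
--     for _ in range(num_childs):
--         sum_meta, value, tree = parse(tree)
--         values.append(value)
--         total += sum_meta
--
--     sum_meta = sum(tree[:num_metadata])
--     total += sum_meta
--
--     if num_childs == 0:
--         value = sum_meta
--     else:
--         value = 0
--         for m in tree[:num_metadata]:
--             idx = m - 1
--             if idx >= 0 and idx < len(values):
--                 value += values[idx]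
--
--     return (total, value, tree[num_metadata:])
-- ===== SOURCE B (Python) =====
-- def parse(tree):
--     # Parse once into an explicit AST, then evaluate total and value by two
--     # separate structural folds over it (A fuses parsing and both computations).
--     def build(t):
--         n_childs, n_meta, rest = t[0], t[1], t[2:]
--         kids = []
--         for _ in range(n_childs):
--             node, rest = build(rest)
--             kids.append(node)
--         return (n_childs, kids, rest[:n_meta]), rest[n_meta:]
--
--     def total(node):
--         _, kids, meta = node
--         return sum(meta) + sum(map(total, kids))
--
--     def value(node):
--         n_childs, kids, meta = node
--         if n_childs == 0:
--             return sum(meta)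
--         vs = list(map(value, kids))
--         return sum(vs[m - 1] for m in meta if 1 <= m <= len(vs))
--
--     root, rest = build(tree)
--     return total(root), value(root), rest
-- ===== Notes on version B (the rewrite author's own statement) =====
-- stated objective: alternative
-- what changed: A fuses parsing and evaluation in one recursive pass that threads (total, value, remaining list) through every call; B uses a different decomposition: one pass parses the flat list into an explicit AST and the total and the node value are then computed by two separate structural folds over that AST.
import Mathlib
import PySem

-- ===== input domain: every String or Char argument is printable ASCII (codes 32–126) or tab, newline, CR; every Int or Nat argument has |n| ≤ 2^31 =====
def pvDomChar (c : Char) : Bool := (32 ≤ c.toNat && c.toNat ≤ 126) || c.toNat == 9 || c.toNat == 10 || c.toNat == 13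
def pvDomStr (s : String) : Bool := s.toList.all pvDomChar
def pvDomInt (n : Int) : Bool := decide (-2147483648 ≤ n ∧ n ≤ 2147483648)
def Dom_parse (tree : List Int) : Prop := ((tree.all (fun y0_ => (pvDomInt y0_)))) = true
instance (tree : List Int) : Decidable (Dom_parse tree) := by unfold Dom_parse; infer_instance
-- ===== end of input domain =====

-- B replaces A's fused recursive descent (which computes total/value/values while parsing)
-- by a different decomposition: one pass parses the flat list into an explicit AST, and the
-- total and the node value are then computed by two separate structural folds over the AST.
-- ===== PORT A =====
mutual
-- parse(tree): header, recursive children loop, metadata slice, value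
def parseGoA : Nat → List Int → Int × Int × List Int
  | 0, _ => (0, 0, [])
  | f+1, tree =>
    let num_childs := PySem.List.pyGetD tree 0 0        -- tree[0] (in range under Pre_)
    let num_metadata := PySem.List.pyGetD tree 1 0      -- tree[1] (in range under Pre_)
    let t := PySem.List.slice tree (some 2) none        -- tree[2:]
    let r := parseKidsA f num_childs.toNat t            -- for _ in range(num_childs)
    let sum_meta := (PySem.List.slice r.2.2 none (some num_metadata)).sum
    let value :=
      if num_childs = 0 then sum_meta
      else (PySem.List.slice r.2.2 none (some num_metadata)).foldl
        (fun acc m => if 0 ≤ m - 1 ∧ m - 1 < (r.2.1.length : Int)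
                      then acc + PySem.List.pyGetD r.2.1 (m - 1) 0 else acc) 0
    (r.1 + sum_meta, value, PySem.List.slice r.2.2 (some num_metadata) none)
  termination_by f _ => (f, 0)
-- the children loop: accumulates (total, values, tree)
def parseKidsA : Nat → Nat → List Int → Int × List Int × List Int
  | _, 0, tree => (0, [], tree)
  | f, k+1, tree =>
    let r := parseGoA f tree
    let rest := parseKidsA f k r.2.2
    (r.1 + rest.1, r.2.1 :: rest.2.1, rest.2.2)
  termination_by f k _ => (f, k + 1)
end

def parse (tree : List Int) : Int × Int × List Int := parseGoA (tree.length + 1) tree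

-- ===== PORT B =====
mutual
-- an AST node: (n_childs, kids, meta)
inductive BTree : Type
  | mk : Int → BForest → List Int → BTree
inductive BForest : Type
  | nil : BForest
  | cons : BTree → BForest → BForest
end

mutual
-- build(t): parse one node, return it with the unconsumed rest
def buildGo : Nat → List Int → BTree × List Int
  | 0, _ => (BTree.mk 0 BForest.nil [], [])
  | f+1, t =>
    let n_childs := PySem.List.pyGetD t 0 0             -- t[0]
    let n_meta := PySem.List.pyGetD t 1 0               -- t[1]
    let r := buildKids f n_childs.toNat (PySem.List.slice t (some 2) none)
    (BTree.mk n_childs r.1 (PySem.List.slice r.2 none (some n_meta)),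
     PySem.List.slice r.2 (some n_meta) none)
  termination_by f _ => (f, 0)
def buildKids : Nat → Nat → List Int → BForest × List Int
  | _, 0, t => (BForest.nil, t)
  | f, k+1, t =>
    let r := buildGo f t
    let rest := buildKids f k r.2
    (BForest.cons r.1 rest.1, rest.2)
  termination_by f k _ => (f, k + 1)
end

mutual
-- total(node) = sum(meta) + sum(map(total, kids))
def totalT : BTree → Int
  | BTree.mk _ kids md => md.sum + totalF kids
def totalF : BForest → Int
  | BForest.nil => 0
  | BForest.cons n rest => totalT n + totalF rest
end

mutual
-- value(node): sum(meta) for a leaf, else indexed sum over the child values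
def valueT : BTree → Int
  | BTree.mk n_childs kids md =>
    if n_childs = 0 then md.sum
    else
      let vs := valuesF kids
      md.foldl (fun acc m => if 1 ≤ m ∧ m ≤ (vs.length : Int)
                             then acc + PySem.List.pyGetD vs (m - 1) 0 else acc) 0
def valuesF : BForest → List Int
  | BForest.nil => []
  | BForest.cons n rest => valueT n :: valuesF rest
end

def parse_alt (tree : List Int) : Int × Int × List Int :=
  let r := buildGo (tree.length + 1) tree
  (totalT r.1, valueT r.1, r.2)

-- ===== PRECONDITION & SPEC =====
-- Grammar membership for the length-prefixed tree format (inherently recursive; it checks the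
-- shape only, computing no outputs): wfGo returns the unconsumed remainder of one node.
def wfKidsAux (g : List Int → Option (List Int)) : Nat → List Int → Option (List Int)
  | 0, t => some t
  | k+1, t =>
    match g t with
    | some r => wfKidsAux g k r
    | none => none

def wfGo : Nat → List Int → Option (List Int)
  | 0, _ => none
  | f+1, t =>
    if 2 ≤ t.length then
      match wfKidsAux (wfGo f) (t.getD 0 0).toNat (t.drop 2) with
      | some r => some (PySem.List.slice r (some (t.getD 1 0)) none)
      | none => none
    else none

-- Pre_ excludes exactly the inputs on which A raises IndexError: some node reached by the
-- descent is shorter than the two header entries it must carry.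
def Pre_parse (tree : List Int) : Prop := (wfGo (tree.length + 1) tree).isSome = true
instance (tree : List Int) : Decidable (Pre_parse tree) := by unfold Pre_parse; infer_instance

def pvWitness_parse : List Int := [2, 3, 0, 3, 10, 11, 12, 1, 1, 0, 1, 99, 2, 1, 1, 2]

def Spec_parse (tree : List Int) (out : Int × Int × List Int) : Prop := out = parse_alt tree
instance (tree : List Int) (out : Int × Int × List Int) : Decidable (Spec_parse tree out) := by unfold Spec_parse; infer_instance

-- ===== CLAIM (what is proved, stated in full; the proofs are below) =====
def Claim_equal_parse : Prop := ∀ (tree : List Int), Dom_parse tree → Pre_parse tree → Spec_parse tree (parse tree)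

-- ===== LEMMAS AND PROOFS =====

theorem pv_fold_eq (vs md : List Int) :
    md.foldl (fun acc m => if 0 ≤ m - 1 ∧ m - 1 < (vs.length : Int)
                           then acc + PySem.List.pyGetD vs (m - 1) 0 else acc) 0 =
    md.foldl (fun acc m => if 1 ≤ m ∧ m ≤ (vs.length : Int)
                           then acc + PySem.List.pyGetD vs (m - 1) 0 else acc) 0 := by
  have hf : (fun (acc m : Int) => if 0 ≤ m - 1 ∧ m - 1 < (vs.length : Int)
                           then acc + PySem.List.pyGetD vs (m - 1) 0 else acc) =
      (fun (acc m : Int) => if 1 ≤ m ∧ m ≤ (vs.length : Int)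
                           then acc + PySem.List.pyGetD vs (m - 1) 0 else acc) := by
    funext acc m
    split_ifs with h1 h2 h2 <;> first | rfl | omega
  rw [hf]

-- A's fused pass equals B's build-then-evaluate on EVERY input (junk fuel cases align too).
theorem pv_main : ∀ (f : Nat) (t : List Int),
    parseGoA f t = (totalT (buildGo f t).1, valueT (buildGo f t).1, (buildGo f t).2) := by
  intro f
  induction f with
  | zero => intro t; simp [parseGoA, buildGo, totalT, totalF, valueT]
  | succ f ih =>
    have kids : ∀ (k : Nat) (t : List Int),
        parseKidsA f k t = (totalF (buildKids f k t).1, valuesF (buildKids f k t).1,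
          (buildKids f k t).2) := by
      intro k
      induction k with
      | zero => intro t; simp [parseKidsA, buildKids, totalF, valuesF]
      | succ k ihk =>
        intro t
        simp only [parseKidsA, buildKids, ih, ihk, totalF, valuesF]
    intro t
    simp only [parseGoA, buildGo, kids, totalT, valueT, Prod.mk.injEq, and_true]
    refine ⟨by ring, ?_⟩
    split_ifs with hc
    · rfl
    · rw [pv_fold_eq]

-- ===== VERDICT (by name: the statement is the Claim_ definition above) =====
theorem parse_spec : Claim_equal_parse := by
  intro tree _ _
  unfold Spec_parse parse parse_alt
  exact pv_main (tree.length + 1) tree
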